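-- pv_equiv track=rewrite | github.com/brock-run/ai-dev-squad-comparison | langgraph-implementation/agents/tester.py | _extract_test_plan
-- ===== SOURCE A (Python) =====
-- from typing import Dict, List, Any
--
-- def _extract_test_plan(text: str) -> Dict[str, List[str]]:
--     """Extract test plan components from text."""
--     # This is a simplified implementation
--     # In a real implementation, this would use more sophisticated parsing
--
--     # Simple extraction of sections
--     strategy = []
--     unit_tests = []
--     integration_tests = []
--     edge_cases = []
--     performance = []
--
--     current_section = None
--
--     for line in text.split("\n"):
--         line = line.strip()
--
--         if not line:
--             continue
--
--         # Check for markdown headers (## Section) or regular headers (Section:)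
--         if ("test strategy" in line.lower() or "strategy" in line.lower()) and (line.startswith("#") or ":" in line):
--             current_section = "strategy"
--             continue
--         elif "unit test" in line.lower() and (line.startswith("#") or ":" in line):
--             current_section = "unit_tests"
--             continue
--         elif "integration test" in line.lower() and (line.startswith("#") or ":" in line):
--             current_section = "integration_tests"
--             continue
--         elif "edge case" in line.lower() and (line.startswith("#") or ":" in line):
--             current_section = "edge_cases"
--             continue
--         elif "performance" in line.lower() and (line.startswith("#") or ":" in line):
--             current_section = "performance"
--             continue
--
--         if current_section == "strategy" and (line.startswith("-") or line.startswith("*") or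
--                                            (len(line) > 2 and line[0].isdigit() and line[1] == ".")):
--             strategy.append(line)
--         elif current_section == "unit_tests" and (line.startswith("-") or line.startswith("*") or
--                                                (len(line) > 2 and line[0].isdigit() and line[1] == ".")):
--             unit_tests.append(line)
--         elif current_section == "integration_tests" and (line.startswith("-") or line.startswith("*") or
--                                                       (len(line) > 2 and line[0].isdigit() and line[1] == ".")):
--             integration_tests.append(line)
--         elif current_section == "edge_cases" and (line.startswith("-") or line.startswith("*") or
--                                                (len(line) > 2 and line[0].isdigit() and line[1] == ".")):
--             edge_cases.append(line)
--         elif current_section == "performance" and (line.startswith("-") or line.startswith("*") or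
--                                                 (len(line) > 2 and line[0].isdigit() and line[1] == ".")):
--             performance.append(line)
--
--     return {
--         "strategy": strategy,
--         "unit_tests": unit_tests,
--         "integration_tests": integration_tests,
--         "edge_cases": edge_cases,
--         "performance": performance
--     }
-- ===== SOURCE B (Python) =====
-- from typing import Dict, List
--
-- _SECTIONS = ["strategy", "unit_tests", "integration_tests", "edge_cases", "performance"]
--
-- def _classify(line: str) -> str:
--     low = line.lower()
--     header = line.startswith("#") or ":" in line
--     if ("test strategy" in low or "strategy" in low) and header:
--         return "strategy"
--     if "unit test" in low and header:
--         return "unit_tests"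
--     if "integration test" in low and header:
--         return "integration_tests"
--     if "edge case" in low and header:
--         return "edge_cases"
--     if "performance" in low and header:
--         return "performance"
--     return None
--
-- def _is_bullet(line: str) -> bool:
--     return line.startswith("-") or line.startswith("*") or (
--         len(line) > 2 and line[0].isdigit() and line[1] == ".")
--
-- def _extract_test_plan(text: str) -> Dict[str, List[str]]:
--     # Pass 1: classify lines, tagging each content line with its current section.
--     tagged = []
--     current = None
--     for raw in text.split("\n"):
--         line = raw.strip()
--         if not line:
--             continue
--         sec = _classify(line)
--         if sec is not None:
--             current = sec
--         elif current is not None: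
--             tagged.append((current, line))
--     # Pass 2: per section, keep only bullet lines.
--     return {name: [l for (s, l) in tagged if s == name and _is_bullet(l)]
--             for name in _SECTIONS}
-- ===== Notes on version B (the rewrite author's own statement) =====
-- stated objective: alternative
-- what changed: B splits A's single interleaved loop into two passes: a first pass that only classifies lines (headers set the current section, other non-empty lines are collected as (section, line) tags), and a second pass that builds each of the five output lists by filtering the tagged lines with the bullet predicate.
import Mathlib
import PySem

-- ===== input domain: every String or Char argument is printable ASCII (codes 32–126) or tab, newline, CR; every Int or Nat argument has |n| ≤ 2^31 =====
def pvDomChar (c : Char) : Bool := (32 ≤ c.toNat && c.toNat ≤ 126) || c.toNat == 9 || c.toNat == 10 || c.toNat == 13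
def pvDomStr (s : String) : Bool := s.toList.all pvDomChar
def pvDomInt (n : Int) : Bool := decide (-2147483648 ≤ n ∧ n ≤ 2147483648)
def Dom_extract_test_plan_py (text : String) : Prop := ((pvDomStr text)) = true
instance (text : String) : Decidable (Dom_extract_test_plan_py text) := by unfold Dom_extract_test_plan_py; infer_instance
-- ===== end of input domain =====

-- B re-decomposes A's single interleaved loop into a classify/tag pass followed by a per-section
-- bullet-filter pass; same results, objective: alternative decomposition.

-- shared bullet predicate (the literal expression both Pythons use):
-- line.startswith("-") or line.startswith("*") or (len(line) > 2 and line[0].isdigit() and line[1] == ".")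
def pvIsBullet (line : List Char) : Bool :=
  PySem.Chars.startswith line ['-'] || PySem.Chars.startswith line ['*'] ||
    (decide (2 < line.length) &&
      (match line with
       | c0 :: c1 :: _ => PySem.Chars.isdigit c0 && (c1 == '.')
       | _ => false))

-- ===== PORT A =====
-- A's loop body: the elif chain over header keywords, then the elif chain of bullet appends.
def pvStepA (st : Option String × List String × List String × List String × List String × List String)
    (raw : List Char) :
    Option String × List String × List String × List String × List String × List String :=
  let line := PySem.Chars.strip raw
  if line = [] then st else
  let low := PySem.Chars.lower line
  let hdr := PySem.Chars.startswith line ['#'] || PySem.Chars.isIn [':'] line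
  if (PySem.Chars.isIn "test strategy".toList low || PySem.Chars.isIn "strategy".toList low) && hdr then
    (some "strategy", st.2)
  else if PySem.Chars.isIn "unit test".toList low && hdr then (some "unit_tests", st.2)
  else if PySem.Chars.isIn "integration test".toList low && hdr then (some "integration_tests", st.2)
  else if PySem.Chars.isIn "edge case".toList low && hdr then (some "edge_cases", st.2)
  else if PySem.Chars.isIn "performance".toList low && hdr then (some "performance", st.2)
  else
    match st with
    | (cur, s, u, i, e, p) =>
      if cur == some "strategy" && pvIsBullet line then (cur, s ++ [String.ofList line], u, i, e, p)
      else if cur == some "unit_tests" && pvIsBullet line then (cur, s, u ++ [String.ofList line], i, e, p)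
      else if cur == some "integration_tests" && pvIsBullet line then (cur, s, u, i ++ [String.ofList line], e, p)
      else if cur == some "edge_cases" && pvIsBullet line then (cur, s, u, i, e ++ [String.ofList line], p)
      else if cur == some "performance" && pvIsBullet line then (cur, s, u, i, e, p ++ [String.ofList line])
      else (cur, s, u, i, e, p)

def extract_test_plan_py (text : String) : List (String × List String) :=
  let fin := (PySem.Chars.splitOn text.toList ['\n']).foldl pvStepA (none, [], [], [], [], [])
  [("strategy", fin.2.1), ("unit_tests", fin.2.2.1), ("integration_tests", fin.2.2.2.1),
   ("edge_cases", fin.2.2.2.2.1), ("performance", fin.2.2.2.2.2)]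

-- ===== PORT B =====
-- B's _classify helper: first-match-wins header detection, None if not a header.
def pvClassify (line : List Char) : Option String :=
  let low := PySem.Chars.lower line
  let hdr := PySem.Chars.startswith line ['#'] || PySem.Chars.isIn [':'] line
  if (PySem.Chars.isIn "test strategy".toList low || PySem.Chars.isIn "strategy".toList low) && hdr then
    some "strategy"
  else if PySem.Chars.isIn "unit test".toList low && hdr then some "unit_tests"
  else if PySem.Chars.isIn "integration test".toList low && hdr then some "integration_tests"
  else if PySem.Chars.isIn "edge case".toList low && hdr then some "edge_cases"
  else if PySem.Chars.isIn "performance".toList low && hdr then some "performance"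
  else none

-- B's pass-1 loop body: tag each content line with the current section.
def pvStepB (st : Option String × List (String × List Char)) (raw : List Char) :
    Option String × List (String × List Char) :=
  let line := PySem.Chars.strip raw
  if line = [] then st else
  match pvClassify line with
  | some sec => (some sec, st.2)
  | none =>
    match st.1 with
    | some cur => (st.1, st.2 ++ [(cur, line)])
    | none => st

def extract_test_plan_py_alt (text : String) : List (String × List String) :=
  let fin := (PySem.Chars.splitOn text.toList ['\n']).foldl pvStepB (none, [])
  ["strategy", "unit_tests", "integration_tests", "edge_cases", "performance"].map
    (fun name =>
      (name, (fin.2.filter (fun p => p.1 == name && pvIsBullet p.2)).map (fun p => String.ofList p.2)))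

-- ===== PRECONDITION & SPEC =====
def Spec_extract_test_plan_py (text : String) (out : List (String × List String)) : Prop := out = extract_test_plan_py_alt text
instance (text : String) (out : List (String × List String)) : Decidable (Spec_extract_test_plan_py text out) := by unfold Spec_extract_test_plan_py; infer_instance

-- ===== CLAIM (what is proved, stated in full; the proofs are below) =====
def Claim_equal_extract_test_plan_py : Prop := ∀ (text : String), Dom_extract_test_plan_py text → Spec_extract_test_plan_py text (extract_test_plan_py text)

-- ===== LEMMAS AND PROOFS =====

-- B's pass-2 filter, as a proof-side abbreviation.
def pvSel (name : String) (t : List (String × List Char)) : List String :=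
  (t.filter (fun p => p.1 == name && pvIsBullet p.2)).map (fun p => String.ofList p.2)

theorem pvSel_append (name : String) (t : List (String × List Char)) (c : String) (l : List Char) :
    pvSel name (t ++ [(c, l)]) =
      pvSel name t ++ (if c == name && pvIsBullet l then [String.ofList l] else []) := by
  simp only [pvSel, List.filter_append, List.map_append]
  by_cases h : (c == name && pvIsBullet l) = true <;> simp [h]

set_option maxHeartbeats 2000000 in
theorem pvStep_rel (raw : List Char) (cur : Option String) (t : List (String × List Char)) :
    pvStepA (cur, pvSel "strategy" t, pvSel "unit_tests" t, pvSel "integration_tests" t,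
             pvSel "edge_cases" t, pvSel "performance" t) raw =
      ((pvStepB (cur, t) raw).1,
       pvSel "strategy" (pvStepB (cur, t) raw).2, pvSel "unit_tests" (pvStepB (cur, t) raw).2,
       pvSel "integration_tests" (pvStepB (cur, t) raw).2, pvSel "edge_cases" (pvStepB (cur, t) raw).2,
       pvSel "performance" (pvStepB (cur, t) raw).2) := by
  unfold pvStepA pvStepB pvClassify
  by_cases h0 : PySem.Chars.strip raw = []
  · simp only [h0, if_true]
  · simp only [h0, if_false]
    cases cur with
    | none =>
      split_ifs with h1 h2 h3 h4 h5 hb1 hb2 hb3 hb4 hb5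
      · rfl
      · rfl
      · rfl
      · rfl
      · rfl
      · simp at hb1
      · simp at hb2
      · simp at hb3
      · simp at hb4
      · simp at hb5
      · rfl
    | some c =>
      split_ifs with h1 h2 h3 h4 h5 hb1 hb2 hb3 hb4 hb5
      · rfl
      · rfl
      · rfl
      · rfl
      · rfl
      · clear h1 h2 h3 h4 h5
        simp only [Bool.and_eq_true, beq_iff_eq, Option.some.injEq] at hb1
        obtain ⟨hc, hbul⟩ := hb1
        subst hc
        simp [pvSel_append, hbul]
      · clear h1 h2 h3 h4 h5
        simp only [Bool.and_eq_true, beq_iff_eq, Option.some.injEq] at hb2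
        obtain ⟨hc, hbul⟩ := hb2
        subst hc
        simp [pvSel_append, hbul]
      · clear h1 h2 h3 h4 h5
        simp only [Bool.and_eq_true, beq_iff_eq, Option.some.injEq] at hb3
        obtain ⟨hc, hbul⟩ := hb3
        subst hc
        simp [pvSel_append, hbul]
      · clear h1 h2 h3 h4 h5
        simp only [Bool.and_eq_true, beq_iff_eq, Option.some.injEq] at hb4
        obtain ⟨hc, hbul⟩ := hb4
        subst hc
        simp [pvSel_append, hbul]
      · clear h1 h2 h3 h4 h5
        simp only [Bool.and_eq_true, beq_iff_eq, Option.some.injEq] at hb5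
        obtain ⟨hc, hbul⟩ := hb5
        subst hc
        simp [pvSel_append, hbul]
      · clear h1 h2 h3 h4 h5
        by_cases hbul : pvIsBullet (PySem.Chars.strip raw) = true
        · have hc1 : c ≠ "strategy" := fun h => hb1 (by simp [h, hbul])
          have hc2 : c ≠ "unit_tests" := fun h => hb2 (by simp [h, hbul])
          have hc3 : c ≠ "integration_tests" := fun h => hb3 (by simp [h, hbul])
          have hc4 : c ≠ "edge_cases" := fun h => hb4 (by simp [h, hbul])
          have hc5 : c ≠ "performance" := fun h => hb5 (by simp [h, hbul])
          simp [pvSel_append, hbul, hc1, hc2, hc3, hc4, hc5]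
        · simp [pvSel_append, hbul]

theorem pvLoop_rel (lines : List (List Char)) (cur : Option String) (t : List (String × List Char)) :
    lines.foldl pvStepA (cur, pvSel "strategy" t, pvSel "unit_tests" t, pvSel "integration_tests" t,
        pvSel "edge_cases" t, pvSel "performance" t) =
      ((lines.foldl pvStepB (cur, t)).1,
       pvSel "strategy" (lines.foldl pvStepB (cur, t)).2,
       pvSel "unit_tests" (lines.foldl pvStepB (cur, t)).2,
       pvSel "integration_tests" (lines.foldl pvStepB (cur, t)).2,
       pvSel "edge_cases" (lines.foldl pvStepB (cur, t)).2,
       pvSel "performance" (lines.foldl pvStepB (cur, t)).2) := by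
  induction lines generalizing cur t with
  | nil => rfl
  | cons raw rest ih =>
    simp only [List.foldl_cons, pvStep_rel raw cur t]
    exact ih (pvStepB (cur, t) raw).1 (pvStepB (cur, t) raw).2

-- ===== VERDICT (by name: the statement is the Claim_ definition above) =====
theorem extract_test_plan_py_spec : Claim_equal_extract_test_plan_py := by
  intro text _
  unfold Spec_extract_test_plan_py extract_test_plan_py extract_test_plan_py_alt
  have h := pvLoop_rel (PySem.Chars.splitOn text.toList ['\n']) none []
  simp only [pvSel, List.filter_nil, List.map_nil] at h
  simp only [h, List.map_cons, List.map_nil]
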